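-- pv_equiv track=rewrite | github.com/skdbenji/tarea1-datascience | Tarea1Data.py | contar_por_estado
-- ===== SOURCE A (Python) =====
-- def contar_por_estado(reporte):
--     conteo_estado={}
--     for fila in reporte:
--         rendimiento=fila["rendimiento"]
--         if rendimiento not in conteo_estado:
--             conteo_estado[rendimiento]=0
--         conteo_estado[rendimiento]+=1
--     return conteo_estado
-- ===== SOURCE B (Python) =====
-- def contar_por_estado(reporte):
--     vals = [fila["rendimiento"] for fila in reporte]
--     return {v: vals.count(v) for v in dict.fromkeys(vals)}
-- ===== Notes on version B (the rewrite author's own statement) =====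
-- stated objective: alternative
-- what changed: Replaces the single-pass running-counter dict with a collect pass over all rendimiento values followed by a distinct-values (dict.fromkeys) comprehension counting each value with vals.count.
import Mathlib
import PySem

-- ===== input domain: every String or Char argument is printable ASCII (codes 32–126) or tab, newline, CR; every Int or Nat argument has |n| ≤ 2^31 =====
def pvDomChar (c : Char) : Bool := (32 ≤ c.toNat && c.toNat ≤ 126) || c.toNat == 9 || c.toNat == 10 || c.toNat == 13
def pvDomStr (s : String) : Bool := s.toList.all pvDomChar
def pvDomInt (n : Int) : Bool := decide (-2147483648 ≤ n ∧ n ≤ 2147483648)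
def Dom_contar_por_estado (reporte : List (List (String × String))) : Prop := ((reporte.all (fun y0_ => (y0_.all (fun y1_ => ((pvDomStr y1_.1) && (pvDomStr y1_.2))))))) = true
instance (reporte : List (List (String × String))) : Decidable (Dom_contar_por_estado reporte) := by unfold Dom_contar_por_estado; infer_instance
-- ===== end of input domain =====

-- B is a two-pass collect-then-count re-implementation (dict.fromkeys over the value list + vals.count);
-- equivalence is about the return value only.

-- ===== PORT A =====
-- fila["rendimiento"]: first-match lookup in the association list (none = KeyError, excluded by Pre_)
def pvLookup (fila : List (String × String)) : Option String :=
  (fila.find? (fun p => p.1 == "rendimiento")).map (·.2)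

-- one iteration of A's loop (the none case is unreachable under Pre_)
def pvStepA (d : PySem.Dict String Int) (fila : List (String × String)) : PySem.Dict String Int :=
  match pvLookup fila with
  | none => d
  | some rendimiento =>
      let d1 := if d.contains rendimiento then d else d.insert rendimiento 0
      d1.insert rendimiento (d1.getD rendimiento 0 + 1)

def contar_por_estado (reporte : List (List (String × String))) : List (String × Int) :=
  (reporte.foldl pvStepA PySem.Dict.empty).items

-- ===== PORT B =====
def contar_por_estado_alt (reporte : List (List (String × String))) : List (String × Int) :=
  let vals := reporte.filterMap pvLookup
  (PySem.List.dedup vals).map (fun v => (v, (vals.count v : Int)))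

-- ===== PRECONDITION & SPEC =====
-- Pre_ excludes rows without a "rendimiento" key, on which A (and B) raise KeyError.
def Pre_contar_por_estado (reporte : List (List (String × String))) : Prop :=
  (reporte.all (fun fila => fila.any (fun p => p.1 == "rendimiento"))) = true
instance (reporte : List (List (String × String))) : Decidable (Pre_contar_por_estado reporte) := by
  unfold Pre_contar_por_estado; infer_instance

def pvWitness_contar_por_estado : (List (List (String × String))) :=
  [[("rendimiento", "alto")], [("rendimiento", "bajo"), ("id", "2")], [("rendimiento", "alto")]]

def Spec_contar_por_estado (reporte : List (List (String × String))) (out : List (String × Int)) : Prop := out = contar_por_estado_alt reporte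
instance (reporte : List (List (String × String))) (out : List (String × Int)) : Decidable (Spec_contar_por_estado reporte out) := by unfold Spec_contar_por_estado; infer_instance

-- ===== CLAIM (what is proved, stated in full; the proofs are below) =====
def Claim_equal_contar_por_estado : Prop := ∀ (reporte : List (List (String × String))), Dom_contar_por_estado reporte → Pre_contar_por_estado reporte → Spec_contar_por_estado reporte (contar_por_estado reporte)

-- ===== LEMMAS AND PROOFS =====

-- A's loop body, when the key is present, is the standard insert/getD counting step
lemma pvStepA_some (d : PySem.Dict String Int) (fila : List (String × String)) (v : String)
    (h : pvLookup fila = some v) :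
    pvStepA d fila = d.insert v (d.getD v 0 + 1) := by
  unfold pvStepA
  rw [h]
  by_cases hc : d.contains v
  · simp [hc]
  · have hc' : d.contains v = false := by simpa using hc
    simp only [hc', Bool.false_eq_true, if_false]
    rw [PySem.Dict.getD_insert_self, PySem.Dict.insert_insert_self,
        PySem.Dict.getD_of_not_contains (h := hc')]

-- A's fold over rows equals the counting fold over the extracted value list
lemma foldl_stepA_eq (l : List (List (String × String))) (d : PySem.Dict String Int)
    (h : ∀ fila ∈ l, (pvLookup fila).isSome) :
    l.foldl pvStepA d =
      (l.filterMap pvLookup).foldl (fun d x => d.insert x (d.getD x 0 + 1)) d := by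
  induction l generalizing d with
  | nil => rfl
  | cons fila rest ih =>
      obtain ⟨v, hv⟩ := Option.isSome_iff_exists.mp (h fila (by simp))
      simp only [List.foldl_cons, List.filterMap_cons, hv]
      rw [pvStepA_some d fila v hv]
      exact ih _ (fun f hf => h f (by simp [hf]))

theorem contar_por_estado_spec : Claim_equal_contar_por_estado := by
  intro reporte _hdom hpre
  unfold Spec_contar_por_estado contar_por_estado contar_por_estado_alt
  have hall : ∀ fila ∈ reporte, (pvLookup fila).isSome := by
    intro fila hf
    have := (List.all_eq_true.mp hpre) fila hf
    rcases List.any_eq_true.mp this with ⟨p, hp, hpk⟩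
    unfold pvLookup
    have hfs : (fila.find? (fun p => p.1 == "rendimiento")).isSome :=
      List.find?_isSome.mpr ⟨p, hp, hpk⟩
    rcases Option.isSome_iff_exists.mp hfs with ⟨q, hq⟩
    simp [hq]
  rw [foldl_stepA_eq reporte PySem.Dict.empty hall,
      PySem.Dict.foldl_insert_getD_add_one_eq_counter, PySem.Dict.items_counter]
  simp [PySem.List.dedup_eq_ofList]
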